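-- pv_equiv track=rewrite | github.com/code4kill/askpdf | src/parser/meta_parser.py | extract_references_section
-- ===== SOURCE A (Python) =====
-- def extract_references_section(text):
--     # Capture the position of the last "References" occurrence, but skip inline citations
--     sections = ['conclusion', 'discussion', 'acknowledgments', 'references', 'bibliography']
--     last_section_found = None
--     for section in sections:
--         found_pos = text.lower().rfind(section)
--         if found_pos != -1:
--             last_section_found = section
--             if section in ['references', 'bibliography']:
--                 break  # Stop at the first occurrence of References or Bibliography
--
--     if last_section_found in ['references', 'bibliography']:
--         return text[found_pos:]
--     return "References section not found"
-- ===== SOURCE B (Python) =====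
-- def extract_references_section(text):
--     # Single backward scan: walk indices from the end; return at the first
--     # (i.e. last-in-text) "references" match, remembering the last "bibliography"
--     # position as a fallback.  No keyword list, no rfind calls.
--     low = text.lower()
--     bib = -1
--     for i in range(len(text) - 1, -1, -1):
--         if low[i:i + 10] == 'references':
--             return text[i:]
--         if bib == -1 and low[i:i + 12] == 'bibliography':
--             bib = i
--     if bib != -1:
--         return text[bib:]
--     return "References section not found"
-- ===== Notes on version B (the rewrite author's own statement) =====
-- stated objective: alternative
-- what changed: Replaced the keyword-list loop with its last_section_found state and repeated lower().rfind calls by a single explicit backward index scan that returns at the first match of the primary marker and memoizes the last position of the fallback marker.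
import Mathlib
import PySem

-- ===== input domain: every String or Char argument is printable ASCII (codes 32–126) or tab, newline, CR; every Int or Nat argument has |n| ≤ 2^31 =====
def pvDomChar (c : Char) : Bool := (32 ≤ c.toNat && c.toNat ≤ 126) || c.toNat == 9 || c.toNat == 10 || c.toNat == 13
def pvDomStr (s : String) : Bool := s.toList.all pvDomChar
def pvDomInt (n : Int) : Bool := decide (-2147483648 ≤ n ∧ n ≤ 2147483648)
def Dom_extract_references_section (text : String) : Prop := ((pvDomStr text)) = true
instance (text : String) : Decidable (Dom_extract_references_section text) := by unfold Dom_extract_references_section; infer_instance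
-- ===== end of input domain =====

-- B replaces A's keyword-list loop and rfind calls by one explicit backward scan (alternative decomposition; result-equal).
-- ===== PORT A =====
-- loop over `sections` carrying (last_section_found, found_pos); breaks on a found 'references'/'bibliography'
def pvLoopA (text : String) : List String → Option String → Int → (Option String × Int)
  | [], last, pos => (last, pos)
  | sec :: rest, last, _ =>
    let fp := PySem.Str.rfind (PySem.Str.lower text) sec
    let last' := if fp ≠ -1 then some sec else last
    if fp ≠ -1 ∧ (sec = "references" ∨ sec = "bibliography") then (last', fp)
    else pvLoopA text rest last' fp

def extract_references_section (text : String) : String :=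
  let r := pvLoopA text ["conclusion", "discussion", "acknowledgments", "references", "bibliography"] none (-1)
  if r.1 = some "references" ∨ r.1 = some "bibliography" then
    PySem.Str.slice text (some r.2) none
  else "References section not found"

-- ===== PORT B =====
-- backward loop `for i in range(len(text)-1, -1, -1)`: counter k+1 handles index k
def pvScanB (tl low : List Char) : Nat → Int → List Char
  | 0, bib => if bib ≠ -1 then tl.drop bib.toNat else "References section not found".toList
  | k+1, bib =>
    if PySem.List.slice low (some (k:Int)) (some ((k:Int)+10)) = "references".toList then
      tl.drop k
    else if bib = -1 ∧ PySem.List.slice low (some (k:Int)) (some ((k:Int)+12)) = "bibliography".toList then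
      pvScanB tl low k (k:Int)
    else pvScanB tl low k bib

def extract_references_section_alt (text : String) : String :=
  let tl := text.toList
  let low := (PySem.Str.lower text).toList
  String.ofList (pvScanB tl low tl.length (-1))

-- ===== PRECONDITION & SPEC =====
def Spec_extract_references_section (text : String) (out : String) : Prop := out = extract_references_section_alt text
instance (text : String) (out : String) : Decidable (Spec_extract_references_section text out) := by unfold Spec_extract_references_section; infer_instance

-- ===== CLAIM (what is proved, stated in full; the proofs are below) =====
def Claim_equal_extract_references_section : Prop := ∀ (text : String), Dom_extract_references_section text → Spec_extract_references_section text (extract_references_section text)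

-- ===== LEMMAS AND PROOFS =====

-- the descending scan over indices k-1 .. 0 that underlies both rfind and pvScanB
def pvRscan (low sub : List Char) : Nat → Int
  | 0 => -1
  | k+1 => if sub.isPrefixOf (low.drop k) then (k:Int) else pvRscan low sub k

theorem pvRscan_nonneg (low sub : List Char) : ∀ k, pvRscan low sub k ≠ -1 → 0 ≤ pvRscan low sub k := by
  intro k
  induction k with
  | zero => simp [pvRscan]
  | succ k ih =>
    simp only [pvRscan]
    split
    · intro _; positivity
    · exact ih

theorem pvGo_eq_rscan (low sub : List Char) :
    ∀ k, PySem.Chars.rfind.go low sub k =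
      if sub.isPrefixOf (low.drop k) then (k:Int) else pvRscan low sub k := by
  intro k
  induction k with
  | zero => simp [PySem.Chars.rfind.go, pvRscan]
  | succ k ih =>
    simp only [PySem.Chars.rfind.go, ih, pvRscan]

theorem pvRfind_eq_rscan (low sub : List Char) (h : sub ≠ []) :
    PySem.Chars.rfind low sub = pvRscan low sub low.length := by
  unfold PySem.Chars.rfind
  rw [pvGo_eq_rscan]
  simp [List.isPrefixOf_iff_prefix, List.prefix_nil, h]

theorem pvTake_eq_iff (l sub : List Char) (n : Nat) (h : sub.length = n) :
    (l.take n = sub) ↔ sub <+: l := by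
  subst h
  rw [List.prefix_iff_eq_take, eq_comm]

theorem pvScanB_eq (tl low : List Char) :
    ∀ k bib, pvScanB tl low k bib =
      if pvRscan low "references".toList k ≠ -1 then
        tl.drop (pvRscan low "references".toList k).toNat
      else if bib ≠ -1 then tl.drop bib.toNat
      else if pvRscan low "bibliography".toList k ≠ -1 then
        tl.drop (pvRscan low "bibliography".toList k).toNat
      else "References section not found".toList := by
  intro k
  induction k with
  | zero => intro bib; simp [pvScanB, pvRscan]
  | succ k ih =>
    intro bib
    have h10 : ((k:Int) + 10) = ((k:Int) + ((10:Nat):Int)) := by norm_num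
    have h12 : ((k:Int) + 12) = ((k:Int) + ((12:Nat):Int)) := by norm_num
    have hk : ¬((k:Int) = -1) := by omega
    have hkt : ((k:Int)).toNat = k := by omega
    have hiff10 : (PySem.List.slice low (some (k:Int)) (some ((k:Int)+10)) = "references".toList) ↔
        "references".toList <+: List.drop k low := by
      rw [h10, PySem.List.slice_natCast_add]
      exact pvTake_eq_iff _ _ 10 (by decide)
    have hiff12 : (PySem.List.slice low (some (k:Int)) (some ((k:Int)+12)) = "bibliography".toList) ↔
        "bibliography".toList <+: List.drop k low := by
      rw [h12, PySem.List.slice_natCast_add]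
      exact pvTake_eq_iff _ _ 12 (by decide)
    by_cases hpr : "references".toList <+: List.drop k low
    · have h1 := hiff10.mpr hpr
      have h2 : "references".toList.isPrefixOf (List.drop k low) = true :=
        List.isPrefixOf_iff_prefix.mpr hpr
      simp only [pvScanB, pvRscan, h1, h2, if_true]
      simp [hk, hkt]
    · have h1 : ¬(PySem.List.slice low (some (k:Int)) (some ((k:Int)+10)) = "references".toList) :=
        fun h => hpr (hiff10.mp h)
      have h2 : ¬("references".toList.isPrefixOf (List.drop k low) = true) :=
        fun h => hpr (List.isPrefixOf_iff_prefix.mp h)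
      by_cases hbib : bib = -1
      · by_cases hpb : "bibliography".toList <+: List.drop k low
        · have h3 := hiff12.mpr hpb
          have h4 : "bibliography".toList.isPrefixOf (List.drop k low) = true :=
            List.isPrefixOf_iff_prefix.mpr hpb
          simp only [pvScanB, pvRscan, h1, h2, h3, h4, hbib]
          refine (ih _).trans ?_
          split_ifs <;> simp_all
        · have h3 : ¬(PySem.List.slice low (some (k:Int)) (some ((k:Int)+12)) = "bibliography".toList) :=
            fun h => hpb (hiff12.mp h)
          have h4 : ¬("bibliography".toList.isPrefixOf (List.drop k low) = true) :=
            fun h => hpb (List.isPrefixOf_iff_prefix.mp h)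
          simp only [pvScanB, pvRscan, h1, h2, h3, h4, hbib]
          refine (ih _).trans ?_
          split_ifs <;> simp_all
      · simp only [pvScanB, pvRscan, h1, h2, hbib]
        refine (ih _).trans ?_
        split_ifs <;> simp_all

theorem pvOfList_slice (text : String) (p : Int) (hp : 0 ≤ p) :
    PySem.Str.slice text (some p) none = String.ofList (text.toList.drop p.toNat) := by
  have h : (PySem.Str.slice text (some p) none).toList = text.toList.drop p.toNat := by
    rw [PySem.Str.toList_slice, PySem.Chars.slice_eq_listSlice, PySem.List.slice_from _ hp]
  rw [← h, String.ofList_toList]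

-- ===== VERDICT (by name: the statement is the Claim_ definition above) =====
set_option maxHeartbeats 1000000 in
theorem extract_references_section_spec : Claim_equal_extract_references_section := by
  intro text _
  unfold Spec_extract_references_section extract_references_section extract_references_section_alt
  have hlen : ((PySem.Str.lower text).toList).length = text.toList.length := by
    rw [PySem.Str.toList_lower]; simp [PySem.Chars.lower]
  have hR : PySem.Str.rfind (PySem.Str.lower text) "references" =
      pvRscan ((PySem.Str.lower text).toList) "references".toList text.toList.length := by
    rw [PySem.Str.rfind_eq, pvRfind_eq_rscan _ _ (by decide), hlen]
  have hB : PySem.Str.rfind (PySem.Str.lower text) "bibliography" =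
      pvRscan ((PySem.Str.lower text).toList) "bibliography".toList text.toList.length := by
    rw [PySem.Str.rfind_eq, pvRfind_eq_rscan _ _ (by decide), hlen]
  have hsR : pvRscan ((PySem.Str.lower text).toList) "references".toList text.toList.length ≠ -1 →
      PySem.Str.slice text (some (pvRscan ((PySem.Str.lower text).toList) "references".toList text.toList.length)) none =
        String.ofList (text.toList.drop (pvRscan ((PySem.Str.lower text).toList) "references".toList text.toList.length).toNat) :=
    fun h => pvOfList_slice _ _ (pvRscan_nonneg _ _ _ h)
  have hsB : pvRscan ((PySem.Str.lower text).toList) "bibliography".toList text.toList.length ≠ -1 →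
      PySem.Str.slice text (some (pvRscan ((PySem.Str.lower text).toList) "bibliography".toList text.toList.length)) none =
        String.ofList (text.toList.drop (pvRscan ((PySem.Str.lower text).toList) "bibliography".toList text.toList.length).toNat) :=
    fun h => pvOfList_slice _ _ (pvRscan_nonneg _ _ _ h)
  simp only [pvLoopA, pvScanB_eq, hR, hB, String.reduceEq, or_self, or_false, false_or,
    and_false, and_true, ne_eq, ite_true, ite_false, reduceIte]
  split_ifs <;> simp_all
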